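-- pv_equiv track=rewrite | github.com/jhhuh/hole-driven-development-skill | tests/baselines/h3-merge/merge3.py | _collect_overlap_group
-- ===== SOURCE A (Python) =====
-- def _collect_overlap_group(
--     ours_regions, theirs_regions, oi, ti
-- ) -> tuple[list, list, int, int]:
--     """
--     Starting from current cursors, collect all regions from both sides
--     whose base ranges overlap, forming one contiguous group.
--     Returns (ours_group, theirs_group, new_oi, new_ti).
--     """
--     o_group = []
--     t_group = []
--
--     # The group spans a base range. Start with the first region from each side.
--     group_end = 0
--
--     if oi < len(ours_regions):
--         o_group.append(ours_regions[oi])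
--         group_end = max(group_end, ours_regions[oi][1])
--         oi += 1
--     if ti < len(theirs_regions):
--         t_group.append(theirs_regions[ti])
--         group_end = max(group_end, theirs_regions[ti][1])
--         ti += 1
--
--     # Extend group while the next region on either side starts before group_end.
--     changed = True
--     while changed:
--         changed = False
--         while oi < len(ours_regions) and ours_regions[oi][0] < group_end:
--             o_group.append(ours_regions[oi])
--             group_end = max(group_end, ours_regions[oi][1])
--             oi += 1
--             changed = True
--         while ti < len(theirs_regions) and theirs_regions[ti][0] < group_end:
--             t_group.append(theirs_regions[ti])
--             group_end = max(group_end, theirs_regions[ti][1])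
--             ti += 1
--             changed = True
--
--     return o_group, t_group, oi, ti
-- ===== SOURCE B (Python) =====
-- def _collect_overlap_group(
--     ours_regions, theirs_regions, oi, ti
-- ) -> tuple[list, list, int, int]:
--     """Two-stage algorithm: first find the group's final base end as the least
--     fixpoint of a scalar map (each round re-scans maximal take-while prefixes
--     under a FIXED threshold and takes the max end seen); then emit the groups
--     and cursors from that final threshold in one pass."""
--     n_o, n_t = len(ours_regions), len(theirs_regions)
--     o0, t0 = oi, ti
--
--     # seed threshold from the first region of each side (as base cursors move past them)
--     end = 0
--     if oi < n_o:
--         end = max(end, ours_regions[oi][1])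
--         oi += 1
--     if ti < n_t:
--         end = max(end, theirs_regions[ti][1])
--         ti += 1
--
--     def reach(e):
--         # maximal take-while prefixes under the fixed threshold e, and the
--         # largest base end seen over them
--         e2, j, k = e, oi, ti
--         while j < n_o and ours_regions[j][0] < e:
--             e2 = max(e2, ours_regions[j][1])
--             j += 1
--         while k < n_t and theirs_regions[k][0] < e:
--             e2 = max(e2, theirs_regions[k][1])
--             k += 1
--         return e2, j, k
--
--     while True:
--         e2, j, k = reach(end)
--         if e2 == end:
--             break
--         end = e2
--
--     o_group = ([ours_regions[o0]] if o0 < n_o else []) \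
--         + [ours_regions[x] for x in range(oi, j)]
--     t_group = ([theirs_regions[t0]] if t0 < n_t else []) \
--         + [theirs_regions[x] for x in range(ti, k)]
--     return o_group, t_group, j, k
-- ===== Notes on version B (the rewrite author's own statement) =====
-- stated objective: alternative
-- what changed: Replaces A's interleaved cursor/group absorption (changed-flag outer loop with two inner drain loops mutating groups, cursors and group_end together) by a two-stage algorithm: stage 1 iterates a scalar round map on group_end alone (pure take-while scans under a fixed threshold per round, no cursor or group state carried between rounds) to its least fixpoint; stage 2 emits the groups and cursors from the final threshold in one pass. Pre_ excludes only inputs where A raises IndexError (a cursor below -len of its list that still passes the 'oi < len' guard); B raises there too.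
import Mathlib
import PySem

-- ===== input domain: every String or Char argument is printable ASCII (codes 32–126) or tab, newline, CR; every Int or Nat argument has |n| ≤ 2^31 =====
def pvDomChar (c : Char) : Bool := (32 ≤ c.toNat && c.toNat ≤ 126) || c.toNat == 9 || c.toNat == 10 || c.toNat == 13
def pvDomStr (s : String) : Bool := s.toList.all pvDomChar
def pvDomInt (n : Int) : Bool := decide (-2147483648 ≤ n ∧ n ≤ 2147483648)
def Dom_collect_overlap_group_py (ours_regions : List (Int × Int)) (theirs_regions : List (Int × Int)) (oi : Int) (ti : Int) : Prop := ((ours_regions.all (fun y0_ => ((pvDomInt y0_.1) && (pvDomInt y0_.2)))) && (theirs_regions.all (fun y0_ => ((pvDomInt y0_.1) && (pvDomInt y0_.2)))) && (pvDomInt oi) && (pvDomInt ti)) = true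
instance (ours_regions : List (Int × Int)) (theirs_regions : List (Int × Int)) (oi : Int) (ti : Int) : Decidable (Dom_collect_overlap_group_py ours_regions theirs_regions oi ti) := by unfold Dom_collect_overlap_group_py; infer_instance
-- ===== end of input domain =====

-- B replaces A's interleaved cursor/group absorption loops by a two-stage algorithm: a scalar
-- least-fixpoint iteration on the group end alone (pure take-while scans under a fixed
-- threshold per round), then a second stage emitting groups and cursors from the final end.

-- ===== PORT A =====
-- list[i] with Python semantics (negative index from the end); the .getD default is never
-- reached on Pre_ inputs (Pre_ excludes exactly the IndexError inputs).
def pvGetP (xs : List (Int × Int)) (i : Int) : Int × Int := (PySem.List.pyGet? xs i).getD (0, 0)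

-- one inner 'while i < len(xs) and xs[i][0] < group_end' loop of A (used for both sides);
-- the Nat fuel only makes the recursion structural: callers pass ((len - i).toNat), which
-- the proofs show is always enough, so the fuel-0 branch is never the one that answers.
def aDrain : Nat → List (Int × Int) → List (Int × Int) → Int → Int → Bool →
    (List (Int × Int)) × Int × Int × Bool
  | 0, _, group, ge, i, changed => (group, ge, i, changed)
  | fuel + 1, xs, group, ge, i, changed =>
    if i < (xs.length : Int) ∧ (pvGetP xs i).1 < ge then
      aDrain fuel xs (group ++ [pvGetP xs i]) (max ge (pvGetP xs i).2) (i + 1) true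
    else (group, ge, i, changed)

-- A's outer 'while changed' loop (fuel as above: one unit per outer round that changed)
def aOuter : Nat → List (Int × Int) → List (Int × Int) → List (Int × Int) → List (Int × Int) →
    Int → Int → Int → (List (Int × Int)) × (List (Int × Int)) × Int × Int
  | 0, _, _, og, tg, _, oi, ti => (og, tg, oi, ti)
  | fuel + 1, ours, theirs, og, tg, ge, oi, ti =>
    match aDrain (((ours.length : Int) - oi).toNat) ours og ge oi false with
    | (og1, ge1, oi1, c1) =>
      match aDrain (((theirs.length : Int) - ti).toNat) theirs tg ge1 ti c1 with
      | (tg2, ge2, ti2, c2) =>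
        if c2 then aOuter fuel ours theirs og1 tg2 ge2 oi1 ti2
        else (og1, tg2, oi1, ti2)

def collect_overlap_group_py (ours_regions : List (Int × Int)) (theirs_regions : List (Int × Int)) (oi : Int) (ti : Int) : (List (Int × Int)) × (List (Int × Int)) × Int × Int :=
  let s₁ := if oi < (ours_regions.length : Int)
    then ([pvGetP ours_regions oi], max 0 (pvGetP ours_regions oi).2, oi + 1)
    else (([] : List (Int × Int)), (0 : Int), oi)
  let s₂ := if ti < (theirs_regions.length : Int)
    then ([pvGetP theirs_regions ti], max s₁.2.1 (pvGetP theirs_regions ti).2, ti + 1)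
    else (([] : List (Int × Int)), s₁.2.1, ti)
  aOuter (((ours_regions.length : Int) - s₁.2.2).toNat + ((theirs_regions.length : Int) - s₂.2.2).toNat + 1)
    ours_regions theirs_regions s₁.1 s₂.1 s₂.2.1 s₁.2.2 s₂.2.2

-- ===== PORT B =====
-- one take-while scan of Source B's reach(): threshold thr is FIXED, acc collects the max end;
-- fuel = remaining distance to the end of the list, always sufficient.
def bScan : Nat → List (Int × Int) → Int → Int → Int → Int × Int
  | 0, _, i, _, acc => (acc, i)
  | fuel + 1, xs, i, thr, acc =>
    if i < (xs.length : Int) ∧ (pvGetP xs i).1 < thr then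
      bScan fuel xs (i + 1) thr (max acc (pvGetP xs i).2)
    else (acc, i)

-- Source B's reach(e): both scans under the fixed threshold e, acc threaded through both
def bReach (ours theirs : List (Int × Int)) (i0 j0 e : Int) : Int × Int × Int :=
  let o := bScan (((ours.length : Int) - i0).toNat) ours i0 e e
  let t := bScan (((theirs.length : Int) - j0).toNat) theirs j0 e o.1
  (t.1, o.2, t.2)

-- Source B's 'while True: e2 = reach(e); if e2 == e: break; e = e2' (fuel proved sufficient)
def bFix : Nat → List (Int × Int) → List (Int × Int) → Int → Int → Int → Int
  | 0, _, _, _, _, e => e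
  | fuel + 1, ours, theirs, i0, j0, e =>
    if (bReach ours theirs i0 j0 e).1 = e then e
    else bFix fuel ours theirs i0 j0 (bReach ours theirs i0 j0 e).1

def collect_overlap_group_py_alt (ours_regions : List (Int × Int)) (theirs_regions : List (Int × Int)) (oi : Int) (ti : Int) : (List (Int × Int)) × (List (Int × Int)) × Int × Int :=
  let nO : Int := (ours_regions.length : Int)
  let nT : Int := (theirs_regions.length : Int)
  let e₁ : Int := if oi < nO then max 0 (pvGetP ours_regions oi).2 else 0
  let oi₁ : Int := if oi < nO then oi + 1 else oi
  let e₀ : Int := if ti < nT then max e₁ (pvGetP theirs_regions ti).2 else e₁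
  let ti₁ : Int := if ti < nT then ti + 1 else ti
  let ef : Int := bFix ((nO - oi₁).toNat + (nT - ti₁).toNat + 2) ours_regions theirs_regions oi₁ ti₁ e₀
  let r := bReach ours_regions theirs_regions oi₁ ti₁ ef
  ((if oi < nO then [pvGetP ours_regions oi] else []) ++ (PySem.List.pyRange oi₁ r.2.1 1).map (pvGetP ours_regions),
   (if ti < nT then [pvGetP theirs_regions ti] else []) ++ (PySem.List.pyRange ti₁ r.2.2 1).map (pvGetP theirs_regions),
   r.2.1, r.2.2)

-- ===== PRECONDITION & SPEC =====
-- Pre_ excludes exactly the inputs on which A raises IndexError: a cursor that passes the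
-- 'cursor < len' guard but lies below -len, so the negative index is out of range.
def Pre_collect_overlap_group_py (ours_regions : List (Int × Int)) (theirs_regions : List (Int × Int)) (oi : Int) (ti : Int) : Prop :=
  (oi < (ours_regions.length : Int) → -(ours_regions.length : Int) ≤ oi) ∧
  (ti < (theirs_regions.length : Int) → -(theirs_regions.length : Int) ≤ ti)
instance (ours_regions : List (Int × Int)) (theirs_regions : List (Int × Int)) (oi : Int) (ti : Int) : Decidable (Pre_collect_overlap_group_py ours_regions theirs_regions oi ti) := by unfold Pre_collect_overlap_group_py; infer_instance

def pvWitness_collect_overlap_group_py : (List (Int × Int)) × (List (Int × Int)) × Int × Int :=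
  ([(0, 5), (3, 10)], [(4, 8)], 0, 0)

def Spec_collect_overlap_group_py (ours_regions : List (Int × Int)) (theirs_regions : List (Int × Int)) (oi : Int) (ti : Int) (out : (List (Int × Int)) × (List (Int × Int)) × Int × Int) : Prop := out = collect_overlap_group_py_alt ours_regions theirs_regions oi ti
instance (ours_regions : List (Int × Int)) (theirs_regions : List (Int × Int)) (oi : Int) (ti : Int) (out : (List (Int × Int)) × (List (Int × Int)) × Int × Int) : Decidable (Spec_collect_overlap_group_py ours_regions theirs_regions oi ti out) := by unfold Spec_collect_overlap_group_py; infer_instance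

-- ===== CLAIM (what is proved, stated in full; the proofs are below) =====
def Claim_equal_collect_overlap_group_py : Prop := ∀ (ours_regions : List (Int × Int)) (theirs_regions : List (Int × Int)) (oi : Int) (ti : Int), Dom_collect_overlap_group_py ours_regions theirs_regions oi ti → Pre_collect_overlap_group_py ours_regions theirs_regions oi ti → Spec_collect_overlap_group_py ours_regions theirs_regions oi ti (collect_overlap_group_py ours_regions theirs_regions oi ti)

-- ===== LEMMAS AND PROOFS =====

-- proof-only device: the flat one-region-at-a-time absorption loop; A's nested loops are
-- proved equal to it, and it is then characterised by the fixpoint description B computes.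
def bLoop : Nat → List (Int × Int) → List (Int × Int) → List (Int × Int) → List (Int × Int) →
    Int → Int → Int → (List (Int × Int)) × (List (Int × Int)) × Int × Int
  | 0, _, _, og, tg, _, oi, ti => (og, tg, oi, ti)
  | fuel + 1, ours, theirs, og, tg, ge, oi, ti =>
    if oi < (ours.length : Int) ∧ (pvGetP ours oi).1 < ge then
      bLoop fuel ours theirs (og ++ [pvGetP ours oi]) tg (max ge (pvGetP ours oi).2) (oi + 1) ti
    else if ti < (theirs.length : Int) ∧ (pvGetP theirs ti).1 < ge then
      bLoop fuel ours theirs og (tg ++ [pvGetP theirs ti]) (max ge (pvGetP theirs ti).2) oi (ti + 1)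
    else (og, tg, oi, ti)

-- (verdict proof is assembled at the bottom)

-- ---- Part 1: A's nested-loop fixpoint equals the flat absorption loop bLoop ----

lemma aDrain_i_le : ∀ (fuel : Nat) (xs group : List (Int × Int)) (ge i : Int) (c : Bool),
    i ≤ (aDrain fuel xs group ge i c).2.2.1 := by
  intro fuel
  induction fuel with
  | zero => intro xs group ge i c; simp [aDrain]
  | succ n ih =>
      intro xs group ge i c
      by_cases h : i < (xs.length : Int) ∧ (pvGetP xs i).1 < ge
      · simp only [aDrain, if_pos h]
        have := ih xs (group ++ [pvGetP xs i]) (max ge (pvGetP xs i).2) (i + 1) true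
        omega
      · simp [aDrain, if_neg h]

lemma aDrain_flag : ∀ (fuel : Nat) (xs group : List (Int × Int)) (ge i : Int) (c : Bool),
    (aDrain fuel xs group ge i c).2.2.2 = true →
    c = true ∨ (i < (xs.length : Int) ∧ i < (aDrain fuel xs group ge i c).2.2.1) := by
  intro fuel
  induction fuel with
  | zero => intro xs group ge i c hf; exact Or.inl hf
  | succ n ih =>
      intro xs group ge i c hf
      by_cases h : i < (xs.length : Int) ∧ (pvGetP xs i).1 < ge
      · right
        refine ⟨h.1, ?_⟩
        have := aDrain_i_le n xs (group ++ [pvGetP xs i]) (max ge (pvGetP xs i).2) (i + 1) true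
        simp only [aDrain, if_pos h]
        omega
      · simp only [aDrain, if_neg h] at hf ⊢
        exact Or.inl hf

lemma aDrain_flag_mono : ∀ (fuel : Nat) (xs group : List (Int × Int)) (ge i : Int) (c : Bool),
    c = true → (aDrain fuel xs group ge i c).2.2.2 = true := by
  intro fuel
  induction fuel with
  | zero => intro xs group ge i c hc; exact hc
  | succ n ih =>
      intro xs group ge i c hc
      by_cases h : i < (xs.length : Int) ∧ (pvGetP xs i).1 < ge
      · simp only [aDrain, if_pos h]; exact ih xs _ _ _ true rfl
      · simp only [aDrain, if_neg h]; exact hc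

-- a drain whose output flag is false (run with enough fuel) did nothing at all
lemma aDrain_eq_false : ∀ (fuel : Nat) (xs group : List (Int × Int)) (ge i : Int) (c : Bool)
    (g' : List (Int × Int)) (ge' i' : Int) (c' : Bool),
    ((xs.length : Int) - i).toNat ≤ fuel →
    aDrain fuel xs group ge i c = (g', ge', i', c') → c' = false →
    g' = group ∧ ge' = ge ∧ i' = i ∧ c = false ∧
      ¬(i < (xs.length : Int) ∧ (pvGetP xs i).1 < ge) := by
  intro fuel
  induction fuel with
  | zero =>
      intro xs group ge i c g' ge' i' c' hs h hf
      have hni : ¬(i < (xs.length : Int) ∧ (pvGetP xs i).1 < ge) := by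
        intro hg; omega
      simp only [aDrain, Prod.mk.injEq] at h
      obtain ⟨h1, h2, h3, h4⟩ := h
      exact ⟨h1.symm, h2.symm, h3.symm, h4 ▸ hf, hni⟩
  | succ n ih =>
      intro xs group ge i c g' ge' i' c' hs h hf
      by_cases hg : i < (xs.length : Int) ∧ (pvGetP xs i).1 < ge
      · exfalso
        have ht := aDrain_flag_mono n xs (group ++ [pvGetP xs i]) (max ge (pvGetP xs i).2) (i + 1) true rfl
        simp only [aDrain, if_pos hg] at h
        rw [h] at ht
        simp only at ht
        rw [hf] at ht
        exact Bool.false_ne_true ht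
      · simp only [aDrain, if_neg hg, Prod.mk.injEq] at h
        obtain ⟨h1, h2, h3, h4⟩ := h
        exact ⟨h1.symm, h2.symm, h3.symm, h4 ▸ hf, hg⟩

-- when neither side qualifies, bLoop returns immediately whatever the fuel
lemma bLoop_nostep : ∀ (f : Nat) (ours theirs og tg : List (Int × Int)) (ge oi ti : Int),
    ¬(oi < (ours.length : Int) ∧ (pvGetP ours oi).1 < ge) →
    ¬(ti < (theirs.length : Int) ∧ (pvGetP theirs ti).1 < ge) →
    bLoop f ours theirs og tg ge oi ti = (og, tg, oi, ti) := by
  intro f ours theirs og tg ge oi ti hO hT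
  cases f with
  | zero => rfl
  | succ n => simp only [bLoop, if_neg hO, if_neg hT]

-- the fuel does not matter as long as it covers the remaining cursor distance
lemma bLoop_fuel : ∀ (f1 f2 : Nat) (ours theirs og tg : List (Int × Int)) (ge oi ti : Int),
    ((ours.length : Int) - oi).toNat + ((theirs.length : Int) - ti).toNat ≤ f1 →
    ((ours.length : Int) - oi).toNat + ((theirs.length : Int) - ti).toNat ≤ f2 →
    bLoop f1 ours theirs og tg ge oi ti = bLoop f2 ours theirs og tg ge oi ti := by
  intro f1
  induction f1 with
  | zero =>
      intro f2 ours theirs og tg ge oi ti h1 h2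
      have hO : ¬(oi < (ours.length : Int) ∧ (pvGetP ours oi).1 < ge) := by intro hg; omega
      have hT : ¬(ti < (theirs.length : Int) ∧ (pvGetP theirs ti).1 < ge) := by intro hg; omega
      rw [bLoop_nostep 0 ours theirs og tg ge oi ti hO hT,
          bLoop_nostep f2 ours theirs og tg ge oi ti hO hT]
  | succ n ih =>
      intro f2 ours theirs og tg ge oi ti h1 h2
      by_cases hO : oi < (ours.length : Int) ∧ (pvGetP ours oi).1 < ge
      · cases f2 with
        | zero => omega
        | succ m =>
            simp only [bLoop, if_pos hO]
            exact ih m ours theirs _ tg _ (oi + 1) ti (by omega) (by omega)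
      · by_cases hT : ti < (theirs.length : Int) ∧ (pvGetP theirs ti).1 < ge
        · cases f2 with
          | zero => omega
          | succ m =>
              simp only [bLoop, if_neg hO, if_pos hT]
              exact ih m ours theirs og _ _ oi (ti + 1) (by omega) (by omega)
        · rw [bLoop_nostep (n + 1) ours theirs og tg ge oi ti hO hT,
              bLoop_nostep f2 ours theirs og tg ge oi ti hO hT]

-- Absorbing a qualifying theirs-region first commutes with the whole bLoop run (the group
-- end is a monotone maximum, so qualification is preserved and the steps commute exactly).
lemma bLoop_absorbT_aux : ∀ (n : Nat) (ours theirs og tg : List (Int × Int)) (ge oi ti : Int) (f g : Nat),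
    ((ours.length : Int) - oi).toNat ≤ n →
    ((ours.length : Int) - oi).toNat + ((theirs.length : Int) - (ti + 1)).toNat ≤ f →
    ((ours.length : Int) - oi).toNat + ((theirs.length : Int) - ti).toNat ≤ g →
    ti < (theirs.length : Int) → (pvGetP theirs ti).1 < ge →
    bLoop f ours theirs og (tg ++ [pvGetP theirs ti]) (max ge (pvGetP theirs ti).2) oi (ti + 1)
      = bLoop g ours theirs og tg ge oi ti := by
  intro n
  induction n with
  | zero =>
      intro ours theirs og tg ge oi ti f g hn hf hg h1 h2
      have hO : ¬(oi < (ours.length : Int) ∧ (pvGetP ours oi).1 < ge) := by intro hx; omega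
      cases g with
      | zero => omega
      | succ m =>
          simp only [bLoop, if_neg hO, if_pos (And.intro h1 h2)]
          exact bLoop_fuel f m ours theirs og _ _ oi (ti + 1) hf (by omega)
  | succ n ih =>
      intro ours theirs og tg ge oi ti f g hn hf hg h1 h2
      by_cases hO : oi < (ours.length : Int) ∧ (pvGetP ours oi).1 < ge
      · have hO' : oi < (ours.length : Int) ∧ (pvGetP ours oi).1 < max ge (pvGetP theirs ti).2 :=
          ⟨hO.1, lt_of_lt_of_le hO.2 (le_max_left _ _)⟩
        cases f with
        | zero => omega
        | succ mf =>
            cases g with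
            | zero => omega
            | succ mg =>
                simp only [bLoop, if_pos hO, if_pos hO']
                rw [max_right_comm]
                exact ih ours theirs (og ++ [pvGetP ours oi]) tg (max ge (pvGetP ours oi).2)
                  (oi + 1) ti mf mg (by omega) (by omega) (by omega) h1
                  (lt_of_lt_of_le h2 (le_max_left _ _))
      · cases g with
        | zero => omega
        | succ m =>
            simp only [bLoop, if_neg hO, if_pos (And.intro h1 h2)]
            exact bLoop_fuel f m ours theirs og _ _ oi (ti + 1) hf (by omega)

-- running A's ours-side drain first does not change what bLoop computes
lemma bLoop_drainO : ∀ (fO : Nat) (ours theirs og tg : List (Int × Int)) (ge oi ti : Int) (c : Bool) (f g : Nat),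
    ((ours.length : Int) - oi).toNat ≤ fO →
    ((ours.length : Int) - (aDrain fO ours og ge oi c).2.2.1).toNat + ((theirs.length : Int) - ti).toNat ≤ f →
    ((ours.length : Int) - oi).toNat + ((theirs.length : Int) - ti).toNat ≤ g →
    bLoop f ours theirs (aDrain fO ours og ge oi c).1 tg (aDrain fO ours og ge oi c).2.1
        (aDrain fO ours og ge oi c).2.2.1 ti
      = bLoop g ours theirs og tg ge oi ti := by
  intro fO
  induction fO with
  | zero =>
      intro ours theirs og tg ge oi ti c f g hs hf hg
      simp only [aDrain] at hf ⊢
      exact bLoop_fuel f g ours theirs og tg ge oi ti hf hg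
  | succ n ih =>
      intro ours theirs og tg ge oi ti c f g hs hf hg
      by_cases hO : oi < (ours.length : Int) ∧ (pvGetP ours oi).1 < ge
      · simp only [aDrain, if_pos hO] at hf ⊢
        cases g with
        | zero => omega
        | succ m =>
            conv_rhs => rw [bLoop]
            rw [if_pos hO]
            exact ih ours theirs (og ++ [pvGetP ours oi]) tg (max ge (pvGetP ours oi).2)
              (oi + 1) ti true f m (by omega) hf (by omega)
      · simp only [aDrain, if_neg hO] at hf ⊢
        exact bLoop_fuel f g ours theirs og tg ge oi ti hf hg

-- running A's theirs-side drain first does not change what bLoop computes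
lemma bLoop_drainT : ∀ (fT : Nat) (ours theirs og tg : List (Int × Int)) (ge oi ti : Int) (c : Bool) (f g : Nat),
    ((theirs.length : Int) - ti).toNat ≤ fT →
    ((ours.length : Int) - oi).toNat + ((theirs.length : Int) - (aDrain fT theirs tg ge ti c).2.2.1).toNat ≤ f →
    ((ours.length : Int) - oi).toNat + ((theirs.length : Int) - ti).toNat ≤ g →
    bLoop f ours theirs og (aDrain fT theirs tg ge ti c).1 (aDrain fT theirs tg ge ti c).2.1
        oi (aDrain fT theirs tg ge ti c).2.2.1
      = bLoop g ours theirs og tg ge oi ti := by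
  intro fT
  induction fT with
  | zero =>
      intro ours theirs og tg ge oi ti c f g hs hf hg
      simp only [aDrain] at hf ⊢
      exact bLoop_fuel f g ours theirs og tg ge oi ti hf hg
  | succ n ih =>
      intro ours theirs og tg ge oi ti c f g hs hf hg
      by_cases hT : ti < (theirs.length : Int) ∧ (pvGetP theirs ti).1 < ge
      · simp only [aDrain, if_pos hT] at hf ⊢
        have step := ih ours theirs og (tg ++ [pvGetP theirs ti]) (max ge (pvGetP theirs ti).2)
          oi (ti + 1) true f
          (((ours.length : Int) - oi).toNat + ((theirs.length : Int) - (ti + 1)).toNat)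
          (by omega) hf le_rfl
        rw [step]
        exact bLoop_absorbT_aux (((ours.length : Int) - oi).toNat) ours theirs og tg ge oi ti
          _ g le_rfl le_rfl hg hT.1 hT.2
      · simp only [aDrain, if_neg hT] at hf ⊢
        exact bLoop_fuel f g ours theirs og tg ge oi ti hf hg

-- A's fixpoint loop computes exactly the flat absorption loop
lemma aOuter_eq_bLoop : ∀ (F : Nat) (ours theirs og tg : List (Int × Int)) (ge oi ti : Int) (f : Nat),
    ((ours.length : Int) - oi).toNat + ((theirs.length : Int) - ti).toNat < F →
    ((ours.length : Int) - oi).toNat + ((theirs.length : Int) - ti).toNat ≤ f →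
    aOuter F ours theirs og tg ge oi ti = bLoop f ours theirs og tg ge oi ti := by
  intro F
  induction F with
  | zero => intro ours theirs og tg ge oi ti f hF hf; omega
  | succ F ih =>
      intro ours theirs og tg ge oi ti f hF hf
      rcases e1 : aDrain (((ours.length : Int) - oi).toNat) ours og ge oi false with ⟨og1, ge1, oi1, c1⟩
      rcases e2 : aDrain (((theirs.length : Int) - ti).toNat) theirs tg ge1 ti c1 with ⟨tg2, ge2, ti2, c2⟩
      have hle1 : oi ≤ oi1 := by
        have := aDrain_i_le (((ours.length : Int) - oi).toNat) ours og ge oi false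
        rw [e1] at this; exact this
      have hle2 : ti ≤ ti2 := by
        have := aDrain_i_le (((theirs.length : Int) - ti).toNat) theirs tg ge1 ti c1
        rw [e2] at this; exact this
      simp only [aOuter, e1, e2]
      by_cases hc : c2 = true
      · rw [if_pos hc]
        have hprog : (oi < (ours.length : Int) ∧ oi < oi1) ∨ (ti < (theirs.length : Int) ∧ ti < ti2) := by
          have F2 := aDrain_flag (((theirs.length : Int) - ti).toNat) theirs tg ge1 ti c1
          rw [e2] at F2
          rcases F2 hc with hc1 | hp
          · have F1 := aDrain_flag (((ours.length : Int) - oi).toNat) ours og ge oi false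
            rw [e1] at F1
            rcases F1 hc1 with h | h
            · exact absurd h (by simp)
            · exact Or.inl h
          · exact Or.inr hp
        have hrec := ih ours theirs og1 tg2 ge2 oi1 ti2
          (((ours.length : Int) - oi1).toNat + ((theirs.length : Int) - ti2).toNat)
          (by omega) le_rfl
        rw [hrec]
        have hT := bLoop_drainT (((theirs.length : Int) - ti).toNat) ours theirs og1 tg ge1 oi1 ti c1
          (((ours.length : Int) - oi1).toNat + ((theirs.length : Int) - ti2).toNat)
          (((ours.length : Int) - oi1).toNat + ((theirs.length : Int) - ti).toNat)
          le_rfl (by rw [e2]) le_rfl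
        rw [e2] at hT
        simp only at hT
        rw [hT]
        have hO := bLoop_drainO (((ours.length : Int) - oi).toNat) ours theirs og tg ge oi ti false
          (((ours.length : Int) - oi1).toNat + ((theirs.length : Int) - ti).toNat) f
          le_rfl (by rw [e1]) hf
        rw [e1] at hO
        simp only at hO
        exact hO
      · rw [if_neg hc]
        have hc2 : c2 = false := by simpa using hc
        obtain ⟨rfl, rfl, rfl, hc1, hgT⟩ := aDrain_eq_false _ theirs tg ge1 ti c1 _ _ _ _ le_rfl e2 hc2
        obtain ⟨rfl, rfl, rfl, -, hgO⟩ := aDrain_eq_false _ ours og ge oi false _ _ _ _ le_rfl e1 hc1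
        exact (bLoop_nostep f ours theirs _ _ _ _ _ hgO hgT).symm




-- ---- Part 2: characterisation of the fixed-threshold scan bScan ----

lemma bScan_i_le : ∀ (f : Nat) (xs : List (Int × Int)) (i thr acc : Int),
    i ≤ (bScan f xs i thr acc).2 := by
  intro f
  induction f with
  | zero => intro xs i thr acc; simp [bScan]
  | succ n ih =>
      intro xs i thr acc
      by_cases h : i < (xs.length : Int) ∧ (pvGetP xs i).1 < thr
      · simp only [bScan, if_pos h]
        have := ih xs (i + 1) thr (max acc (pvGetP xs i).2)
        omega
      · simp [bScan, if_neg h]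

lemma bScan_acc_le : ∀ (f : Nat) (xs : List (Int × Int)) (i thr acc : Int),
    acc ≤ (bScan f xs i thr acc).1 := by
  intro f
  induction f with
  | zero => intro xs i thr acc; simp [bScan]
  | succ n ih =>
      intro xs i thr acc
      by_cases h : i < (xs.length : Int) ∧ (pvGetP xs i).1 < thr
      · simp only [bScan, if_pos h]
        have := ih xs (i + 1) thr (max acc (pvGetP xs i).2)
        have : max acc (pvGetP xs i).2 ≤ (bScan n xs (i + 1) thr (max acc (pvGetP xs i).2)).1 := this
        omega
      · simp [bScan, if_neg h]

-- full characterisation of a scan run with sufficient fuel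
lemma bScan_spec : ∀ (f : Nat) (xs : List (Int × Int)) (i thr acc : Int),
    ((xs.length : Int) - i).toNat ≤ f →
    (∀ x, i ≤ x → x < (bScan f xs i thr acc).2 → x < (xs.length : Int) ∧ (pvGetP xs x).1 < thr) ∧
    ¬((bScan f xs i thr acc).2 < (xs.length : Int) ∧ (pvGetP xs (bScan f xs i thr acc).2).1 < thr) ∧
    (∀ x, i ≤ x → x < (bScan f xs i thr acc).2 → (pvGetP xs x).2 ≤ (bScan f xs i thr acc).1) ∧
    (∀ M, acc ≤ M → (∀ x, i ≤ x → x < (bScan f xs i thr acc).2 → (pvGetP xs x).2 ≤ M) →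
      (bScan f xs i thr acc).1 ≤ M) := by
  intro f
  induction f with
  | zero =>
      intro xs i thr acc hs
      have hni : ¬(i < (xs.length : Int) ∧ (pvGetP xs i).1 < thr) := by intro hg; omega
      simp only [bScan]
      exact ⟨fun x hx1 hx2 => absurd hx2 (by omega), hni,
        fun x hx1 hx2 => absurd hx2 (by omega), fun M hM _ => hM⟩
  | succ n ih =>
      intro xs i thr acc hs
      by_cases h : i < (xs.length : Int) ∧ (pvGetP xs i).1 < thr
      · have hrec := ih xs (i + 1) thr (max acc (pvGetP xs i).2) (by omega)
        have hle := bScan_i_le n xs (i + 1) thr (max acc (pvGetP xs i).2)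
        simp only [bScan, if_pos h]
        obtain ⟨h1, h2, h3, h4⟩ := hrec
        refine ⟨?_, h2, ?_, ?_⟩
        · intro x hx1 hx2
          rcases eq_or_lt_of_le hx1 with rfl | hlt
          · exact h
          · exact h1 x (by omega) hx2
        · intro x hx1 hx2
          rcases eq_or_lt_of_le hx1 with rfl | hlt
          · have := bScan_acc_le n xs (i + 1) thr (max acc (pvGetP xs i).2)
            omega
          · exact h3 x (by omega) hx2
        · intro M hM hends
          exact h4 M (by
            have hei := hends i le_rfl (by omega)
            omega) (fun x hx1 hx2 => hends x (by omega) hx2)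
      · simp only [bScan, if_neg h]
        exact ⟨fun x hx1 hx2 => absurd hx2 (by omega), h,
          fun x hx1 hx2 => absurd hx2 (by omega), fun M hM _ => hM⟩

-- the scan cursor is the unique point satisfying the prefix/stop description
lemma bScan_unique : ∀ (f : Nat) (xs : List (Int × Int)) (i thr acc c : Int),
    ((xs.length : Int) - i).toNat ≤ f →
    i ≤ c →
    (∀ x, i ≤ x → x < c → x < (xs.length : Int) ∧ (pvGetP xs x).1 < thr) →
    ¬(c < (xs.length : Int) ∧ (pvGetP xs c).1 < thr) →
    (bScan f xs i thr acc).2 = c := by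
  intro f xs i thr acc c hs hc h1 h2
  obtain ⟨g1, g2, -, -⟩ := bScan_spec f xs i thr acc hs
  have hlei := bScan_i_le f xs i thr acc
  rcases lt_trichotomy (bScan f xs i thr acc).2 c with h | h | h
  · exact absurd (h1 _ hlei h) g2
  · exact h
  · exact absurd (g1 c hc h) h2

-- same-fuel monotonicity in the threshold and accumulator
lemma bScan_mono : ∀ (f : Nat) (xs : List (Int × Int)) (i thr thr' acc acc' : Int),
    thr ≤ thr' → acc ≤ acc' →
    (bScan f xs i thr acc).1 ≤ (bScan f xs i thr' acc').1 ∧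
    (bScan f xs i thr acc).2 ≤ (bScan f xs i thr' acc').2 := by
  intro f
  induction f with
  | zero => intro xs i thr thr' acc acc' h1 h2; simp [bScan]; omega
  | succ n ih =>
      intro xs i thr thr' acc acc' h1 h2
      by_cases h : i < (xs.length : Int) ∧ (pvGetP xs i).1 < thr
      · have h' : i < (xs.length : Int) ∧ (pvGetP xs i).1 < thr' := ⟨h.1, by omega⟩
        simp only [bScan, if_pos h, if_pos h']
        exact ih xs (i + 1) thr thr' _ _ h1 (by omega)
      · simp only [bScan, if_neg h]
        constructor
        · calc acc ≤ acc' := h2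
            _ ≤ _ := bScan_acc_le (n + 1) xs i thr' acc'
        · exact bScan_i_le (n + 1) xs i thr' acc'


-- ---- Part 3: the flat loop produces contiguous slices described by a closed threshold ----

lemma bLoop_char : ∀ (f : Nat) (ours theirs og tg : List (Int × Int)) (ge i j : Int),
    ((ours.length : Int) - i).toNat + ((theirs.length : Int) - j).toNat ≤ f →
    ∃ E CO CT,
      bLoop f ours theirs og tg ge i j =
        (og ++ (PySem.List.pyRange i CO 1).map (pvGetP ours), tg ++ (PySem.List.pyRange j CT 1).map (pvGetP theirs), CO, CT) ∧
      ge ≤ E ∧ i ≤ CO ∧ j ≤ CT ∧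
      (∀ x, i ≤ x → x < CO → x < (ours.length : Int) ∧ (pvGetP ours x).1 < E) ∧
      ¬(CO < (ours.length : Int) ∧ (pvGetP ours CO).1 < E) ∧
      (∀ x, j ≤ x → x < CT → x < (theirs.length : Int) ∧ (pvGetP theirs x).1 < E) ∧
      ¬(CT < (theirs.length : Int) ∧ (pvGetP theirs CT).1 < E) ∧
      (∀ x, i ≤ x → x < CO → (pvGetP ours x).2 ≤ E) ∧
      (∀ x, j ≤ x → x < CT → (pvGetP theirs x).2 ≤ E) ∧
      (∀ F cO cT, ge ≤ F → i ≤ cO → j ≤ cT →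
        (∀ x, i ≤ x → x < cO → x < (ours.length : Int) ∧ (pvGetP ours x).1 < F) →
        ¬(cO < (ours.length : Int) ∧ (pvGetP ours cO).1 < F) →
        (∀ x, j ≤ x → x < cT → x < (theirs.length : Int) ∧ (pvGetP theirs x).1 < F) →
        ¬(cT < (theirs.length : Int) ∧ (pvGetP theirs cT).1 < F) →
        (∀ x, i ≤ x → x < cO → (pvGetP ours x).2 ≤ F) →
        (∀ x, j ≤ x → x < cT → (pvGetP theirs x).2 ≤ F) →
        CO ≤ cO ∧ CT ≤ cT ∧ E ≤ F) := by
  intro f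
  induction f with
  | zero =>
      intro ours theirs og tg ge i j hs
      refine ⟨ge, i, j, ?_, le_rfl, le_rfl, le_rfl, ?_, ?_, ?_, ?_, ?_, ?_, ?_⟩
      · simp [bLoop, PySem.List.pyRange_one_eq_nil le_rfl]
      · intro x hx1 hx2; omega
      · intro hg; omega
      · intro x hx1 hx2; omega
      · intro hg; omega
      · intro x hx1 hx2; omega
      · intro x hx1 hx2; omega
      · intro F cO cT hF hcO hcT _ _ _ _ _ _; exact ⟨hcO, hcT, hF⟩
  | succ n ih =>
      intro ours theirs og tg ge i j hs
      by_cases hO : i < (ours.length : Int) ∧ (pvGetP ours i).1 < ge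
      · obtain ⟨E, CO, CT, heq, hgeE, hiCO, hjCT, hOpre, hOstop, hTpre, hTstop, hOend, hTend, hdom⟩ :=
          ih ours theirs (og ++ [pvGetP ours i]) tg (max ge (pvGetP ours i).2) (i + 1) j (by omega)
        refine ⟨E, CO, CT, ?_, le_trans (le_max_left _ _) hgeE, by omega, hjCT, ?_, hOstop, hTpre, hTstop, ?_, hTend, ?_⟩
        · simp only [bLoop, if_pos hO, heq]
          rw [PySem.List.pyRange_one_cons (by omega : i < CO)]
          simp
        · intro x hx1 hx2
          rcases eq_or_lt_of_le hx1 with rfl | hlt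
          · exact ⟨hO.1, lt_of_lt_of_le hO.2 (le_trans (le_max_left _ _) hgeE)⟩
          · exact hOpre x (by omega) hx2
        · intro x hx1 hx2
          rcases eq_or_lt_of_le hx1 with rfl | hlt
          · exact le_trans (le_max_right _ _) hgeE
          · exact hOend x (by omega) hx2
        · intro F cO cT hF hcO hcT hp1 hp2 hp3 hp4 he1 he2
          have hicO : i < cO := by
            rcases eq_or_lt_of_le hcO with rfl | h
            · exact absurd ⟨hO.1, by omega⟩ hp2
            · exact h
          have hEi : (pvGetP ours i).2 ≤ F := he1 i le_rfl hicO
          exact hdom F cO cT (max_le hF hEi) (by omega) hcT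
            (fun x hx1 hx2 => hp1 x (by omega) hx2) hp2 hp3 hp4
            (fun x hx1 hx2 => he1 x (by omega) hx2)
            he2
      · by_cases hT : j < (theirs.length : Int) ∧ (pvGetP theirs j).1 < ge
        · obtain ⟨E, CO, CT, heq, hgeE, hiCO, hjCT, hOpre, hOstop, hTpre, hTstop, hOend, hTend, hdom⟩ :=
            ih ours theirs og (tg ++ [pvGetP theirs j]) (max ge (pvGetP theirs j).2) i (j + 1) (by omega)
          refine ⟨E, CO, CT, ?_, le_trans (le_max_left _ _) hgeE, hiCO, by omega, ?_, hOstop, ?_, hTstop, ?_, ?_, ?_⟩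
          · simp only [bLoop, if_neg hO, if_pos hT, heq]
            rw [PySem.List.pyRange_one_cons (by omega : j < CT)]
            simp
          · intro x hx1 hx2
            have h1 := hOpre x hx1 hx2
            exact h1
          · intro x hx1 hx2
            rcases eq_or_lt_of_le hx1 with rfl | hlt
            · exact ⟨hT.1, lt_of_lt_of_le hT.2 (le_trans (le_max_left _ _) hgeE)⟩
            · exact hTpre x (by omega) hx2
          · intro x hx1 hx2
            exact hOend x hx1 hx2
          · intro x hx1 hx2
            rcases eq_or_lt_of_le hx1 with rfl | hlt
            · exact le_trans (le_max_right _ _) hgeE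
            · exact hTend x (by omega) hx2
          · intro F cO cT hF hcO hcT hp1 hp2 hp3 hp4 he1 he2
            have hjcT : j < cT := by
              rcases eq_or_lt_of_le hcT with rfl | h
              · exact absurd ⟨hT.1, by omega⟩ hp4
              · exact h
            have hEj : (pvGetP theirs j).2 ≤ F := he2 j le_rfl hjcT
            exact hdom F cO cT (max_le hF hEj) hcO (by omega)
              hp1 hp2 (fun x hx1 hx2 => hp3 x (by omega) hx2) hp4
              he1 (fun x hx1 hx2 => he2 x (by omega) hx2)
        · refine ⟨ge, i, j, ?_, le_rfl, le_rfl, le_rfl, ?_, ?_, ?_, ?_, ?_, ?_, ?_⟩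
          · rw [bLoop_nostep (n + 1) ours theirs og tg ge i j hO hT]
            simp [PySem.List.pyRange_one_eq_nil le_rfl]
          · intro x hx1 hx2; omega
          · exact hO
          · intro x hx1 hx2; omega
          · exact hT
          · intro x hx1 hx2; omega
          · intro x hx1 hx2; omega
          · intro F cO cT hF hcO hcT _ _ _ _ _ _; exact ⟨hcO, hcT, hF⟩


-- ---- Part 4: B's scalar fixpoint iteration reaches exactly the flat loop's threshold ----

lemma bReach_eq (ours theirs : List (Int × Int)) (i0 j0 e : Int) :
    bReach ours theirs i0 j0 e =
      ((bScan (((theirs.length : Int) - j0).toNat) theirs j0 e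
          (bScan (((ours.length : Int) - i0).toNat) ours i0 e e).1).1,
       (bScan (((ours.length : Int) - i0).toNat) ours i0 e e).2,
       (bScan (((theirs.length : Int) - j0).toNat) theirs j0 e
          (bScan (((ours.length : Int) - i0).toNat) ours i0 e e).1).2) := rfl

lemma bReach_le (ours theirs : List (Int × Int)) (i0 j0 e : Int) :
    e ≤ (bReach ours theirs i0 j0 e).1 := by
  rw [bReach_eq]
  have h1 := bScan_acc_le (((ours.length : Int) - i0).toNat) ours i0 e e
  have h2 := bScan_acc_le (((theirs.length : Int) - j0).toNat) theirs j0 e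
    (bScan (((ours.length : Int) - i0).toNat) ours i0 e e).1
  exact le_trans h1 h2

lemma bReach_mono (ours theirs : List (Int × Int)) (i0 j0 e e' : Int) (h : e ≤ e') :
    (bReach ours theirs i0 j0 e).1 ≤ (bReach ours theirs i0 j0 e').1 ∧
    (bReach ours theirs i0 j0 e).2.1 ≤ (bReach ours theirs i0 j0 e').2.1 ∧
    (bReach ours theirs i0 j0 e).2.2 ≤ (bReach ours theirs i0 j0 e').2.2 := by
  rw [bReach_eq, bReach_eq]
  obtain ⟨hA, hC⟩ := bScan_mono (((ours.length : Int) - i0).toNat) ours i0 e e' e e' h h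
  obtain ⟨hA', hC'⟩ := bScan_mono (((theirs.length : Int) - j0).toNat) theirs j0 e e' _ _ h hA
  exact ⟨hA', hC, hC'⟩

-- if one round moves neither cursor, the next round's threshold is already a fixpoint
lemma bReach_stable (ours theirs : List (Int × Int)) (i0 j0 e : Int)
    (hO : (bReach ours theirs i0 j0 (bReach ours theirs i0 j0 e).1).2.1 = (bReach ours theirs i0 j0 e).2.1)
    (hT : (bReach ours theirs i0 j0 (bReach ours theirs i0 j0 e).1).2.2 = (bReach ours theirs i0 j0 e).2.2) :
    (bReach ours theirs i0 j0 (bReach ours theirs i0 j0 e).1).1 = (bReach ours theirs i0 j0 e).1 := by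
  set e1 := (bReach ours theirs i0 j0 e).1 with he1
  refine le_antisymm ?_ (bReach_le ours theirs i0 j0 e1)
  simp only [bReach_eq] at hO hT ⊢
  simp only [bReach_eq] at he1
  obtain ⟨po1, po2, po3, po4⟩ := bScan_spec (((ours.length : Int) - i0).toNat) ours i0 e e le_rfl
  obtain ⟨pt1, pt2, pt3, pt4⟩ := bScan_spec (((theirs.length : Int) - j0).toNat) theirs j0 e
    (bScan (((ours.length : Int) - i0).toNat) ours i0 e e).1 le_rfl
  obtain ⟨qo1, qo2, qo3, qo4⟩ := bScan_spec (((ours.length : Int) - i0).toNat) ours i0 e1 e1 le_rfl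
  obtain ⟨qt1, qt2, qt3, qt4⟩ := bScan_spec (((theirs.length : Int) - j0).toNat) theirs j0 e1
    (bScan (((ours.length : Int) - i0).toNat) ours i0 e1 e1).1 le_rfl
  have hoacc : (bScan (((ours.length : Int) - i0).toNat) ours i0 e e).1 ≤ e1 := by
    rw [he1]
    exact bScan_acc_le _ _ _ _ _
  -- the inner ours-scan under e1 yields accumulator ≤ e1
  have h1 : (bScan (((ours.length : Int) - i0).toNat) ours i0 e1 e1).1 ≤ e1 := by
    apply qo4 e1 le_rfl
    intro x hx1 hx2
    have hx2' : x < (bScan (((ours.length : Int) - i0).toNat) ours i0 e e).2 := by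
      have := hO
      omega
    exact le_trans (po3 x hx1 hx2') hoacc
  apply qt4 e1 h1
  intro x hx1 hx2
  have hx2' : x < (bScan (((theirs.length : Int) - j0).toNat) theirs j0 e
      (bScan (((ours.length : Int) - i0).toNat) ours i0 e e).1).2 := by
    have := hT
    omega
  calc (pvGetP theirs x).2 ≤ _ := pt3 x hx1 hx2'
    _ = e1 := by rw [he1]

lemma bFix_of_fix (f : Nat) (ours theirs : List (Int × Int)) (i0 j0 e : Int)
    (h : (bReach ours theirs i0 j0 e).1 = e) : bFix f ours theirs i0 j0 e = e := by
  cases f with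
  | zero => rfl
  | succ n => simp only [bFix, if_pos h]

lemma bFix_ge : ∀ (f : Nat) (ours theirs : List (Int × Int)) (i0 j0 e : Int),
    e ≤ bFix f ours theirs i0 j0 e := by
  intro f
  induction f with
  | zero => intro ours theirs i0 j0 e; exact le_rfl
  | succ n ih =>
      intro ours theirs i0 j0 e
      by_cases h : (bReach ours theirs i0 j0 e).1 = e
      · simp only [bFix, if_pos h]
        exact le_rfl
      · simp only [bFix, if_neg h]
        exact le_trans (bReach_le ours theirs i0 j0 e) (ih ours theirs i0 j0 _)

lemma bFix_le : ∀ (f : Nat) (ours theirs : List (Int × Int)) (i0 j0 e E : Int),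
    (bReach ours theirs i0 j0 E).1 = E → e ≤ E → bFix f ours theirs i0 j0 e ≤ E := by
  intro f
  induction f with
  | zero => intro ours theirs i0 j0 e E hE he; exact he
  | succ n ih =>
      intro ours theirs i0 j0 e E hE he
      by_cases h : (bReach ours theirs i0 j0 e).1 = e
      · simp only [bFix, if_pos h]; exact he
      · simp only [bFix, if_neg h]
        refine ih ours theirs i0 j0 _ E hE ?_
        calc (bReach ours theirs i0 j0 e).1 ≤ (bReach ours theirs i0 j0 E).1 :=
            (bReach_mono ours theirs i0 j0 e E he).1
          _ = E := hE

-- the chosen fuel always reaches a fixpoint of the round map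
lemma bFix_fix : ∀ (f : Nat) (ours theirs : List (Int × Int)) (i0 j0 e E : Int),
    (bReach ours theirs i0 j0 E).1 = E → e ≤ E →
    ((bReach ours theirs i0 j0 E).2.1 - (bReach ours theirs i0 j0 e).2.1).toNat +
      ((bReach ours theirs i0 j0 E).2.2 - (bReach ours theirs i0 j0 e).2.2).toNat < f →
    (bReach ours theirs i0 j0 (bFix f ours theirs i0 j0 e)).1 = bFix f ours theirs i0 j0 e := by
  intro f
  induction f with
  | zero => intro ours theirs i0 j0 e E hE he hm; omega
  | succ n ih =>
      intro ours theirs i0 j0 e E hE he hm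
      by_cases h : (bReach ours theirs i0 j0 e).1 = e
      · simp only [bFix, if_pos h]; exact h
      · simp only [bFix, if_neg h]
        set e1 := (bReach ours theirs i0 j0 e).1 with he1
        have he1E : e1 ≤ E := by
          calc e1 ≤ (bReach ours theirs i0 j0 E).1 := (bReach_mono ours theirs i0 j0 e E he).1
            _ = E := hE
        by_cases hstay : (bReach ours theirs i0 j0 e1).2.1 = (bReach ours theirs i0 j0 e).2.1 ∧
            (bReach ours theirs i0 j0 e1).2.2 = (bReach ours theirs i0 j0 e).2.2
        · have hfix := bReach_stable ours theirs i0 j0 e hstay.1 hstay.2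
          rw [bFix_of_fix n ours theirs i0 j0 e1 hfix]
          exact hfix
        · have hmono := bReach_mono ours theirs i0 j0 e e1 (bReach_le ours theirs i0 j0 e)
          have hmono2 := bReach_mono ours theirs i0 j0 e1 E he1E
          refine ih ours theirs i0 j0 e1 E hE he1E ?_
          have h1 := hmono.2.1
          have h2 := hmono.2.2
          have h3 := hmono2.2.1
          have h4 := hmono2.2.2
          omega


-- ---- Part 5: the flat loop's result is exactly what B's two stages compute ----

lemma main_core (ours theirs og0 tg0 : List (Int × Int)) (e0 i0 j0 : Int) :
    bLoop (((ours.length : Int) - i0).toNat + ((theirs.length : Int) - j0).toNat)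
        ours theirs og0 tg0 e0 i0 j0 =
      (og0 ++ (PySem.List.pyRange i0 (bReach ours theirs i0 j0
          (bFix (((ours.length : Int) - i0).toNat + ((theirs.length : Int) - j0).toNat + 2)
            ours theirs i0 j0 e0)).2.1 1).map (pvGetP ours),
       tg0 ++ (PySem.List.pyRange j0 (bReach ours theirs i0 j0
          (bFix (((ours.length : Int) - i0).toNat + ((theirs.length : Int) - j0).toNat + 2)
            ours theirs i0 j0 e0)).2.2 1).map (pvGetP theirs),
       (bReach ours theirs i0 j0
          (bFix (((ours.length : Int) - i0).toNat + ((theirs.length : Int) - j0).toNat + 2)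
            ours theirs i0 j0 e0)).2.1,
       (bReach ours theirs i0 j0
          (bFix (((ours.length : Int) - i0).toNat + ((theirs.length : Int) - j0).toNat + 2)
            ours theirs i0 j0 e0)).2.2) := by
  set ef := bFix (((ours.length : Int) - i0).toNat + ((theirs.length : Int) - j0).toNat + 2)
    ours theirs i0 j0 e0 with hef
  obtain ⟨E, CO, CT, heq, hgeE, hiCO, hjCT, hOpre, hOstop, hTpre, hTstop, hOend, hTend, hdom⟩ :=
    bLoop_char (((ours.length : Int) - i0).toNat + ((theirs.length : Int) - j0).toNat)
      ours theirs og0 tg0 e0 i0 j0 le_rfl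
  -- the flat loop's threshold E is a fixpoint of the round map, with cursors (CO, CT)
  have hcO : (bScan (((ours.length : Int) - i0).toNat) ours i0 E E).2 = CO :=
    bScan_unique _ ours i0 E E CO le_rfl hiCO hOpre hOstop
  obtain ⟨-, -, -, po4⟩ := bScan_spec (((ours.length : Int) - i0).toNat) ours i0 E E le_rfl
  have hoacc : (bScan (((ours.length : Int) - i0).toNat) ours i0 E E).1 = E := by
    refine le_antisymm (po4 E le_rfl ?_) (bScan_acc_le _ _ _ _ _)
    intro x hx1 hx2
    rw [hcO] at hx2
    exact hOend x hx1 hx2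
  have hcT : (bScan (((theirs.length : Int) - j0).toNat) theirs j0 E E).2 = CT :=
    bScan_unique _ theirs j0 E E CT le_rfl hjCT hTpre hTstop
  obtain ⟨-, -, -, pt4⟩ := bScan_spec (((theirs.length : Int) - j0).toNat) theirs j0 E E le_rfl
  have htacc : (bScan (((theirs.length : Int) - j0).toNat) theirs j0 E E).1 = E := by
    refine le_antisymm (pt4 E le_rfl ?_) (bScan_acc_le _ _ _ _ _)
    intro x hx1 hx2
    rw [hcT] at hx2
    exact hTend x hx1 hx2
  have hfixE : (bReach ours theirs i0 j0 E).1 = E := by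
    simp only [bReach_eq]
    rw [hoacc]
    exact htacc
  have hreachE2 : (bReach ours theirs i0 j0 E).2.1 = CO := by
    simp only [bReach_eq]
    exact hcO
  have hreachE3 : (bReach ours theirs i0 j0 E).2.2 = CT := by
    simp only [bReach_eq]
    rw [hoacc]
    exact hcT
  -- measure bound: the chosen fuel reaches the fixpoint
  have hCObd : i0 < CO → CO ≤ (ours.length : Int) := by
    intro h
    have := (hOpre (CO - 1) (by omega) (by omega)).1
    omega
  have hCTbd : j0 < CT → CT ≤ (theirs.length : Int) := by
    intro h
    have := (hTpre (CT - 1) (by omega) (by omega)).1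
    omega
  have hc0O : i0 ≤ (bReach ours theirs i0 j0 e0).2.1 := by
    simp only [bReach_eq]
    exact bScan_i_le _ _ _ _ _
  have hc0T : j0 ≤ (bReach ours theirs i0 j0 e0).2.2 := by
    simp only [bReach_eq]
    exact bScan_i_le _ _ _ _ _
  have hmeas : ((bReach ours theirs i0 j0 E).2.1 - (bReach ours theirs i0 j0 e0).2.1).toNat +
      ((bReach ours theirs i0 j0 E).2.2 - (bReach ours theirs i0 j0 e0).2.2).toNat <
      (((ours.length : Int) - i0).toNat + ((theirs.length : Int) - j0).toNat + 2) := by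
    rw [hreachE2, hreachE3]
    have hb1 : (CO - (bReach ours theirs i0 j0 e0).2.1).toNat ≤ ((ours.length : Int) - i0).toNat := by
      rcases eq_or_lt_of_le hiCO with rfl | h
      · omega
      · have := hCObd h
        omega
    have hb2 : (CT - (bReach ours theirs i0 j0 e0).2.2).toNat ≤ ((theirs.length : Int) - j0).toNat := by
      rcases eq_or_lt_of_le hjCT with rfl | h
      · omega
      · have := hCTbd h
        omega
    omega
  have hefE : ef ≤ E := bFix_le _ ours theirs i0 j0 e0 E hfixE hgeE
  have hfixef : (bReach ours theirs i0 j0 ef).1 = ef := by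
    rw [hef]
    exact bFix_fix _ ours theirs i0 j0 e0 E hfixE hgeE hmeas
  -- domination: E is at most the fixpoint the iteration reaches
  obtain ⟨ao1, ao2, ao3, -⟩ := bScan_spec (((ours.length : Int) - i0).toNat) ours i0 ef ef le_rfl
  obtain ⟨at1, at2, at3, -⟩ := bScan_spec (((theirs.length : Int) - j0).toNat) theirs j0 ef
    (bScan (((ours.length : Int) - i0).toNat) ours i0 ef ef).1 le_rfl
  have hrt1 : (bScan (((theirs.length : Int) - j0).toNat) theirs j0 ef
      (bScan (((ours.length : Int) - i0).toNat) ours i0 ef ef).1).1 = ef := by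
    have := hfixef
    simp only [bReach_eq] at this
    exact this
  have hro_le : (bScan (((ours.length : Int) - i0).toNat) ours i0 ef ef).1 ≤ ef := by
    calc _ ≤ _ := bScan_acc_le (((theirs.length : Int) - j0).toNat) theirs j0 ef _
      _ = ef := hrt1
  have hdom' := hdom ef
    (bScan (((ours.length : Int) - i0).toNat) ours i0 ef ef).2
    (bScan (((theirs.length : Int) - j0).toNat) theirs j0 ef
      (bScan (((ours.length : Int) - i0).toNat) ours i0 ef ef).1).2
    (hef ▸ bFix_ge _ ours theirs i0 j0 e0)
    (bScan_i_le _ _ _ _ _) (bScan_i_le _ _ _ _ _)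
    ao1 ao2 at1 at2
    (fun x hx1 hx2 => le_trans (ao3 x hx1 hx2) hro_le)
    (fun x hx1 hx2 => le_trans (at3 x hx1 hx2) (le_of_eq hrt1))
  have hEef : E = ef := le_antisymm hdom'.2.2 hefE
  have h21 : (bReach ours theirs i0 j0 ef).2.1 = CO := by
    rw [← hEef]
    exact hreachE2
  have h22 : (bReach ours theirs i0 j0 ef).2.2 = CT := by
    rw [← hEef]
    exact hreachE3
  rw [h21, h22]
  exact heq



-- ===== VERDICT (by name: the statement is the Claim_ definition above) =====
theorem collect_overlap_group_py_spec : Claim_equal_collect_overlap_group_py := by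
  intro ours theirs oi ti _ _
  unfold Spec_collect_overlap_group_py collect_overlap_group_py collect_overlap_group_py_alt
  by_cases hoi : oi < (ours.length : Int) <;>
    by_cases hti : ti < (theirs.length : Int) <;>
    simp only [hoi, hti, if_true, if_false] <;>
    (rw [aOuter_eq_bLoop _ ours theirs _ _ _ _ _ _ (Nat.lt_succ_self _) le_rfl]
     exact main_core ours theirs _ _ _ _ _)
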